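-- pv_equiv track=rewrite | github.com/derekdperez/nightmare | server_app/store.py | _pick_recent_order_column
-- ===== SOURCE A (Python) =====
-- from typing import Any, Optional
--
-- def _pick_recent_order_column(columns: list[tuple[str, str, str]]) -> Optional[str]:
--     if not columns:
--         return None
--     names = [str(row[0] or "") for row in columns]
--     preferred = [
--         "updated_at_utc",
--         "completed_at_utc",
--         "heartbeat_at_utc",
--         "started_at_utc",
--         "created_at_utc",
--         "updated_at",
--         "created_at",
--         "id",
--         "line_number",
--     ]
--     lowered = {name.lower(): name for name in names}
--     for candidate in preferred:
--         if candidate in lowered: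
--             return lowered[candidate]
--     return None
-- ===== SOURCE B (Python) =====
-- def _pick_recent_order_column(columns):
--     preferred = [
--         "updated_at_utc",
--         "completed_at_utc",
--         "heartbeat_at_utc",
--         "started_at_utc",
--         "created_at_utc",
--         "updated_at",
--         "created_at",
--         "id",
--         "line_number",
--     ]
--     # Single pass over the columns, tracking the best (lowest) preference rank
--     # seen so far; '<=' makes a later duplicate of the winning rank overwrite,
--     # which matches the last-wins overwrite of A's lowered dict.
--     best = None
--     best_rank = len(preferred)
--     for row in columns:
--         name = str(row[0] or "")
--         low = name.lower()
--         if low in preferred: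
--             r = preferred.index(low)
--             if r <= best_rank:
--                 best, best_rank = name, r
--     return best
-- ===== Notes on version B (the rewrite author's own statement) =====
-- stated objective: alternative
-- what changed: B replaces A's candidate-priority lookup (build a lowercase->name dict, then walk the preferred list and return the first hit) by a single pass over the columns that tracks the best (lowest) preference rank seen so far, with '<=' so a later duplicate of the winning rank overwrites (matching the dict's last-wins semantics).
import Mathlib
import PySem

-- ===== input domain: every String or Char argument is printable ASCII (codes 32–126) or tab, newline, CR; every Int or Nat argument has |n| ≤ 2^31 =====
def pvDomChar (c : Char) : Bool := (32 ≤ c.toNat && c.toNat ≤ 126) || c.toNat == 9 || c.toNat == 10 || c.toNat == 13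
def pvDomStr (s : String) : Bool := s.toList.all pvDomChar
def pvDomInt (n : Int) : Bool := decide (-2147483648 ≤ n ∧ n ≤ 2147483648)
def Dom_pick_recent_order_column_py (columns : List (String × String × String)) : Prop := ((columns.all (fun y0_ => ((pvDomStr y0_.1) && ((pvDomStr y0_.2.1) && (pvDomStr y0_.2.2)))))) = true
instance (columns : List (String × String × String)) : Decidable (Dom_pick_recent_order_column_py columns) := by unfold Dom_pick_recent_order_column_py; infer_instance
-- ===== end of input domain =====

-- B replaces A's lowered-name dict + preferred-list walk by a single pass over the columns tracking the best preference rank ('<=' keeps last-wins ties); alternative decomposition, not claimed faster.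


-- ===== PORT A =====
def pvPreferred : List String :=
  ["updated_at_utc", "completed_at_utc", "heartbeat_at_utc", "started_at_utc",
   "created_at_utc", "updated_at", "created_at", "id", "line_number"]

-- A's loop over `preferred`: `if candidate in lowered: return lowered[candidate]`
def pvLoopA (lowered : PySem.Dict String String) : List String → Option String
  | [] => none
  | c :: rest =>
    match lowered.get? c with
    | some v => some v
    | none => pvLoopA lowered rest

def pick_recent_order_column_py (columns : List (String × String × String)) : Option String :=
  if columns = [] then none
  else
    -- str(row[0] or "") on a str is the string itself (falls back to "" only when already "")
    let names := columns.map (fun row => row.1)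
    let lowered := names.foldl (fun d n => d.insert (PySem.Str.lower n) n) PySem.Dict.empty
    pvLoopA lowered pvPreferred

-- ===== PORT B =====
-- B's loop body: name = str(row[0] or ""); low = name.lower();
-- if low in preferred: r = preferred.index(low); if r <= best_rank: best, best_rank = name, r
def pvStepB (s : Option String × Nat) (name : String) : Option String × Nat :=
  let low := PySem.Str.lower name
  if pvPreferred.contains low then
    match PySem.List.index? pvPreferred low with
    | some r => if r ≤ s.2 then (some name, r) else s
    | none => s
  else s

def pick_recent_order_column_py_alt (columns : List (String × String × String)) : Option String :=
  (columns.foldl (fun s row => pvStepB s row.1) ((none : Option String), pvPreferred.length)).1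

-- ===== PRECONDITION & SPEC =====
def Spec_pick_recent_order_column_py (columns : List (String × String × String)) (out : Option String) : Prop := out = pick_recent_order_column_py_alt columns
instance (columns : List (String × String × String)) (out : Option String) : Decidable (Spec_pick_recent_order_column_py columns out) := by unfold Spec_pick_recent_order_column_py; infer_instance

-- ===== CLAIM (what is proved, stated in full; the proofs are below) =====
def Claim_equal_pick_recent_order_column_py : Prop := ∀ (columns : List (String × String × String)), Dom_pick_recent_order_column_py columns → Spec_pick_recent_order_column_py columns (pick_recent_order_column_py columns)

-- ===== LEMMAS AND PROOFS =====

-- reference evaluator: A's preferred-list walk, keeping the running candidate index,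
-- with the dict lookup replaced by a reverse scan of the names
def pvRef (ns : List String) : List String → Nat → Option String × Nat
  | [], i => (none, i)
  | c :: rest, i =>
    match ns.reverse.find? (fun n => PySem.Str.lower n == c) with
    | some m => (some m, i)
    | none => pvRef ns rest (i + 1)

-- position of `low` in `prefs`, counting from `i`
def pvIdxFrom (prefs : List String) (i : Nat) (low : String) : Option Nat :=
  match prefs with
  | [] => none
  | c :: rest => if c = low then some i else pvIdxFrom rest (i + 1) low

theorem pvRef_snd_ge (ns : List String) (prefs : List String) (i : Nat) :
    i ≤ (pvRef ns prefs i).2 := by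
  induction prefs generalizing i with
  | nil => simp [pvRef]
  | cons c rest ih =>
    simp only [pvRef]
    cases ns.reverse.find? (fun n => PySem.Str.lower n == c) with
    | none => exact le_trans (Nat.le_succ i) (ih (i + 1))
    | some m => simp

theorem pvIdxFrom_ge (prefs : List String) (i : Nat) (low : String) (r : Nat)
    (h : pvIdxFrom prefs i low = some r) : i ≤ r := by
  induction prefs generalizing i with
  | nil => simp [pvIdxFrom] at h
  | cons c rest ih =>
    simp only [pvIdxFrom] at h
    split at h
    · injection h with h'
      omega
    · exact le_trans (Nat.le_succ i) (ih (i + 1) h)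

-- the dict built by last-wins insertion looks up exactly what a reverse scan finds
theorem pvDict_eq_revFind (names : List String) (c : String) :
    (names.foldl (fun d n => d.insert (PySem.Str.lower n) n) PySem.Dict.empty).get? c
      = names.reverse.find? (fun n => PySem.Str.lower n == c) := by
  induction names using List.reverseRecOn with
  | nil => rfl
  | append_singleton ns n ih =>
    rw [List.foldl_append, List.reverse_append]
    simp only [List.foldl_cons, List.foldl_nil, List.reverse_singleton, List.singleton_append,
      List.find?_cons]
    by_cases h : c = PySem.Str.lower n
    · subst h
      rw [PySem.Dict.get?_insert_self]
      simp
    · rw [PySem.Dict.get?_insert_of_ne _ _ h, ih]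
      have hne : (PySem.Str.lower n == c) = false := beq_eq_false_iff_ne.mpr (Ne.symm h)
      simp [hne]

-- A's loop computes the first component of the reference evaluator
theorem pvLoopA_eq_ref (ns : List String) (prefs : List String) (i : Nat) :
    pvLoopA (ns.foldl (fun d n => d.insert (PySem.Str.lower n) n) PySem.Dict.empty) prefs
      = (pvRef ns prefs i).1 := by
  induction prefs generalizing i with
  | nil => rfl
  | cons c rest ih =>
    simp only [pvLoopA, pvRef, pvDict_eq_revFind]
    cases ns.reverse.find? (fun n => PySem.Str.lower n == c) with
    | none => exact ih (i + 1)
    | some m => rfl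

-- appending one name updates the reference evaluator exactly like B's accumulator step
theorem pvRef_append (ns : List String) (n : String) (prefs : List String) (i : Nat) :
    pvRef (ns ++ [n]) prefs i =
      match pvIdxFrom prefs i (PySem.Str.lower n) with
      | some r => if r ≤ (pvRef ns prefs i).2 then (some n, r) else pvRef ns prefs i
      | none => pvRef ns prefs i := by
  induction prefs generalizing i with
  | nil => simp [pvRef, pvIdxFrom]
  | cons c rest ih =>
    by_cases h : c = PySem.Str.lower n
    · have hb : (PySem.Str.lower n == c) = true := by simp [h]
      simp only [pvRef, pvIdxFrom, List.reverse_append, List.reverse_singleton,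
        List.singleton_append, List.find?_cons, hb, if_pos h]
      have hge := pvRef_snd_ge ns (c :: rest) i
      simp only [pvRef] at hge
      rw [if_pos hge]
    · have hb : (PySem.Str.lower n == c) = false := beq_eq_false_iff_ne.mpr (fun e => h e.symm)
      simp only [pvRef, pvIdxFrom, List.reverse_append, List.reverse_singleton,
        List.singleton_append, List.find?_cons, hb, if_neg h]
      cases hf : ns.reverse.find? (fun m => PySem.Str.lower m == c) with
      | some m =>
        cases hx : pvIdxFrom rest (i + 1) (PySem.Str.lower n) with
        | none => rfl
        | some r =>
          have : i + 1 ≤ r := pvIdxFrom_ge rest (i + 1) _ r hx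
          have : ¬ r ≤ i := by omega
          simp [this]
      | none => exact ih (i + 1)

theorem pvIdxFrom_eq_index? (prefs : List String) (i : Nat) (low : String) :
    pvIdxFrom prefs i low = (PySem.List.index? prefs low).map (· + i) := by
  induction prefs generalizing i with
  | nil => simp [pvIdxFrom, PySem.List.index?]
  | cons c rest ih =>
    by_cases h : c = low
    · subst h
      rw [PySem.List.index?_cons_self]
      simp [pvIdxFrom]
    · rw [PySem.List.index?_cons_of_ne rest h]
      simp only [pvIdxFrom, if_neg h, ih (i + 1), Option.map_map]
      cases PySem.List.index? rest low with
      | none => rfl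
      | some r => simp; omega

theorem pvIndex?_none_not_mem (xs : List String) (v : String)
    (h : PySem.List.index? xs v = none) : v ∉ xs :=
  (PySem.List.index?_eq_none_iff _ _).mp h

theorem pvIndex?_some_mem (xs : List String) (v : String) (r : Nat)
    (h : PySem.List.index? xs v = some r) : v ∈ xs :=
  (PySem.List.index?_isSome_iff _ _).mp (by rw [h]; rfl)

theorem pvFold_cols (cols : List (String × String × String)) (b : Option String × Nat) :
    cols.foldl (fun s row => pvStepB s row.1) b = (cols.map (fun row => row.1)).foldl pvStepB b := by
  induction cols generalizing b with
  | nil => rfl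
  | cons c cs ih => simp [List.foldl_cons, List.map_cons, ih]

-- B's fold over the names computes the reference evaluator
theorem pvFoldB_eq_ref (ns : List String) :
    ns.foldl pvStepB ((none : Option String), pvPreferred.length) = pvRef ns pvPreferred 0 := by
  induction ns using List.reverseRecOn with
  | nil => decide
  | append_singleton ms m ih =>
    rw [List.foldl_append, List.foldl_cons, List.foldl_nil, ih, pvRef_append,
      pvIdxFrom_eq_index?]
    cases hx : PySem.List.index? pvPreferred (PySem.Str.lower m) with
    | none =>
      have hnm : PySem.Str.lower m ∉ pvPreferred := pvIndex?_none_not_mem _ _ hx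
      simp [pvStepB, hnm]
    | some r =>
      have hmem : PySem.Str.lower m ∈ pvPreferred :=
        pvIndex?_some_mem _ _ _ hx
      have hx' : List.idxOf? (PySem.Str.lower m) pvPreferred = some r := by simpa using hx
      simp [pvStepB, hx', hmem]

-- ===== VERDICT (by name: the statement is the Claim_ definition above) =====
theorem pick_recent_order_column_py_spec : Claim_equal_pick_recent_order_column_py := by
  intro columns _
  unfold Spec_pick_recent_order_column_py pick_recent_order_column_py pick_recent_order_column_py_alt
  by_cases h : columns = []
  · subst h; rfl
  · simp only [h, if_false]
    rw [pvFold_cols, pvFoldB_eq_ref, pvLoopA_eq_ref _ _ 0]
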